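-- pv_equiv track=rewrite | github.com/Arcimiendar/DISCOTestTask | disco/utils.py | get_all_possible_word_truncation_indices
-- ===== SOURCE A (Python) =====
-- from itertools import combinations
--
-- def get_all_possible_word_truncation_indices(words):
--     words_indices = list(range(len(words)))
--
--     def count_how_many_sequencial_numbers(combination):
--         if combination[0] != 0:
--             return -1
--         elif combination[-1] != len(words) - 1:
--             return -1
--         count = 0
--         iterator = iter(combination)
--         prev_element = next(iterator)
--         for element in iterator:
--             if element - 1 == prev_element:
--                 count += 1
--             prev_element = element
--         return count
--
--     valid_combinations = []
--     for i in range(2, len(words)):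
--         combins = filter(
--             lambda combination: i - 2 == count_how_many_sequencial_numbers(combination), combinations(words_indices, i)
--         )
--         valid_combinations.extend(combins)
--     return valid_combinations
-- ===== SOURCE B (Python) =====
-- def get_all_possible_word_truncation_indices(words):
--     # Directly enumerate prefix-block + suffix-block index pairs; for each size i
--     # the valid combinations are [0..p] + [n-i+p+1..n-1], emitted in lex order
--     # (p descending).
--     n = len(words)
--     result = []
--     for i in range(2, n):
--         for p in range(i - 2, -1, -1):
--             result.append(tuple(range(p + 1)) + tuple(range(n - i + p + 1, n)))
--     return result
-- ===== Notes on version B (the rewrite author's own statement) =====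
-- stated objective: faster
-- what changed: Instead of enumerating all C(n,i) combinations and filtering for exactly one gap, B directly constructs each valid prefix-block+suffix-block pair [0..p]+[n-i+p+1..n-1] per size i, in the same lex order (p descending).
import Mathlib
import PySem

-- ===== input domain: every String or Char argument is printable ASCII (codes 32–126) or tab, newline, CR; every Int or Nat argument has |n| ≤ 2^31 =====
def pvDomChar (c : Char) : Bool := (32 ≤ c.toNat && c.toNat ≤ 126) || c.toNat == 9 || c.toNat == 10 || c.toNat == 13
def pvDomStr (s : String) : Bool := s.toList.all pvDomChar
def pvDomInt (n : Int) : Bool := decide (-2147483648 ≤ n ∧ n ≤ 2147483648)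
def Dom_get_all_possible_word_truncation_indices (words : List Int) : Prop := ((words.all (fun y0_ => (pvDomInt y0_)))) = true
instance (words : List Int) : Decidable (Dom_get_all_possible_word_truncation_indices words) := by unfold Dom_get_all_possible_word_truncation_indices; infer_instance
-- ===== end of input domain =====

-- B enumerates the valid prefix-block+suffix-block index pairs directly instead of
-- filtering all combinations; objective: faster (asymptotic).

-- ===== PORT A =====
-- the inner loop of count_how_many_sequencial_numbers (count/prev accumulators)
def pvSeqLoop (count : Int) (prev : Int) : List Int → Int
  | [] => count
  | e :: rest => pvSeqLoop (if e - 1 == prev then count + 1 else count) e rest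

-- count_how_many_sequencial_numbers; the [] case is unreachable (A only passes
-- combinations of length ≥ 2; Python would raise IndexError on an empty tuple)
def pvSeqCount (c : List Int) (nWords : Nat) : Int :=
  match c with
  | [] => -1
  | x :: rest =>
    if x ≠ 0 then -1
    else if c.getLast? ≠ some ((nWords : Int) - 1) then -1
    else pvSeqLoop 0 x rest

-- itertools.combinations(xs, k), in its positional (lexicographic-by-position) order
def pvCombos (xs : List Int) (k : Nat) : List (List Int) :=
  match xs, k with
  | _, 0 => [[]]
  | [], _ + 1 => []
  | x :: rest, k + 1 => ((pvCombos rest k).map (fun c => x :: c)) ++ pvCombos rest (k + 1)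

def get_all_possible_word_truncation_indices (words : List Int) : List (List Int) :=
  let wordsIndices := (List.range words.length).map (fun (j : Nat) => (j : Int))
  (List.range' 2 (words.length - 2)).foldl
    (fun acc i =>
      acc ++ (pvCombos wordsIndices i).filter
        (fun c => ((i : Int) - 2) == pvSeqCount c words.length)) []

-- ===== PORT B =====
def get_all_possible_word_truncation_indices_alt (words : List Int) : List (List Int) :=
  let n := words.length
  (List.range' 2 (n - 2)).foldl
    (fun acc i =>
      acc ++ (List.range (i - 1)).reverse.map (fun p =>
        (List.range (p + 1)).map (fun (j : Nat) => (j : Int)) ++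
        (List.range (i - 1 - p)).map (fun (j : Nat) => (n : Int) - (i : Int) + (p : Int) + 1 + (j : Int))))
    []

-- ===== PRECONDITION & SPEC =====
def Spec_get_all_possible_word_truncation_indices (words : List Int) (out : List (List Int)) : Prop := out = get_all_possible_word_truncation_indices_alt words
instance (words : List Int) (out : List (List Int)) : Decidable (Spec_get_all_possible_word_truncation_indices words out) := by unfold Spec_get_all_possible_word_truncation_indices; infer_instance

-- ===== CLAIM (what is proved, stated in full; the proofs are below) =====
def Claim_equal_get_all_possible_word_truncation_indices : Prop := ∀ (words : List Int), Dom_get_all_possible_word_truncation_indices words → Spec_get_all_possible_word_truncation_indices words (get_all_possible_word_truncation_indices words)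

-- ===== LEMMAS AND PROOFS =====

-- [a, a+1, ..., a+m-1]
def seqI (a : Int) : Nat → List Int
  | 0 => []
  | m + 1 => a :: seqI (a + 1) m

-- number of adjacent pairs (b, e) with e = b + 1
def seqPairs : List Int → Int
  | b :: e :: t => (if e - 1 = b then 1 else 0) + seqPairs (e :: t)
  | _ => 0

-- the valid combination of size i with prefix [0..p]: [0..p] ++ [n-i+p+1..n-1]
def blockf (n i p : Nat) : List Int :=
  seqI 0 (p + 1) ++ seqI ((n : Int) - (i : Int) + (p : Int) + 1) (i - 1 - p)

theorem seqI_length (a : Int) (m : Nat) : (seqI a m).length = m := by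
  induction m generalizing a with
  | zero => rfl
  | succ m ih => simp [seqI, ih]

theorem mem_seqI {x a : Int} {m : Nat} : x ∈ seqI a m ↔ a ≤ x ∧ x < a + m := by
  induction m generalizing a with
  | zero => simp [seqI]
  | succ m ih =>
    simp only [seqI, List.mem_cons, ih]
    push_cast
    omega

theorem pairwise_seqI (a : Int) (m : Nat) : List.Pairwise (· < ·) (seqI a m) := by
  induction m generalizing a with
  | zero => exact .nil
  | succ m ih =>
    refine List.Pairwise.cons (fun y hy => ?_) (ih (a + 1))
    have := (mem_seqI.mp hy).1
    omega

theorem seqI_append (a : Int) (u v : Nat) :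
    seqI a (u + v) = seqI a u ++ seqI (a + u) v := by
  induction u generalizing a with
  | zero => simp [seqI]
  | succ u ih =>
    have h : u + 1 + v = (u + v) + 1 := by omega
    rw [h, seqI, ih, seqI, List.cons_append,
      show a + ((u + 1 : Nat) : Int) = a + 1 + (u : Int) by push_cast; ring]

theorem seqI_getLast? (a : Int) (m : Nat) (h : 1 ≤ m) :
    (seqI a m).getLast? = some (a + m - 1) := by
  induction m generalizing a with
  | zero => omega
  | succ m ih =>
    cases m with
    | zero => simp [seqI]
    | succ m' =>
      rw [seqI, seqI, List.getLast?_cons_cons, ← seqI, ih (a + 1) (by omega)]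
      congr 1
      push_cast
      ring

theorem seqI_sublist {a b : Int} {u m : Nat} (h1 : b ≤ a) (h2 : a + u ≤ b + m) :
    (seqI a u).Sublist (seqI b m) := by
  have hd : ((a - b).toNat : Int) = a - b := Int.toNat_of_nonneg (by omega)
  have hm : m = (a - b).toNat + (u + (m - (a - b).toNat - u)) := by omega
  rw [hm, seqI_append, seqI_append]
  have hab : b + ((a - b).toNat : Int) = a := by omega
  rw [hab]
  exact List.Sublist.trans (List.sublist_append_left _ _) (List.sublist_append_right _ _)

theorem mem_pvCombos {xs : List Int} {k : Nat} {c : List Int} :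
    c ∈ pvCombos xs k ↔ c.Sublist xs ∧ c.length = k := by
  induction xs generalizing k c with
  | nil =>
    cases k with
    | zero =>
      simp only [pvCombos, List.mem_singleton]
      constructor
      · rintro rfl; exact ⟨List.Sublist.refl _, rfl⟩
      · rintro ⟨hs, _⟩; exact List.sublist_nil.mp hs
    | succ k =>
      simp only [pvCombos, List.not_mem_nil, false_iff, not_and]
      intro hs
      have := List.sublist_nil.mp hs
      subst this
      simp
  | cons x rest ih =>
    cases k with
    | zero =>
      simp only [pvCombos, List.mem_singleton]
      constructor
      · rintro rfl; exact ⟨List.nil_sublist _, rfl⟩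
      · rintro ⟨_, hl⟩; exact List.length_eq_zero_iff.mp hl
    | succ k =>
      rw [pvCombos]
      simp only [List.mem_append, List.mem_map]
      rw [List.sublist_cons_iff]
      constructor
      · rintro (⟨c', hc', rfl⟩ | h)
        · obtain ⟨hs, hl⟩ := ih.mp hc'
          exact ⟨Or.inr ⟨c', rfl, hs⟩, by simp [hl]⟩
        · obtain ⟨hs, hl⟩ := ih.mp h
          exact ⟨Or.inl hs, hl⟩
      · rintro ⟨(hs | ⟨r, rfl, hr⟩), hl⟩
        · exact Or.inr (ih.mpr ⟨hs, hl⟩)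
        · exact Or.inl ⟨r, ih.mpr ⟨hr, by simpa using hl⟩, rfl⟩

theorem lex_append_cons {l u v : List Int} {a b : Int} (h : a < b) :
    List.Lex (· < ·) (l ++ a :: u) (l ++ b :: v) := by
  induction l with
  | nil => exact List.Lex.rel h
  | cons x l ih => exact List.Lex.cons ih

theorem lex_asymm : ∀ {l₁ l₂ : List Int},
    List.Lex (· < ·) l₁ l₂ → List.Lex (· < ·) l₂ l₁ → False := by
  intro l₁ l₂ h1
  induction h1 with
  | nil => intro h2; cases h2
  | cons _ ih =>
    intro h2
    cases h2 with
    | cons h' => exact ih h'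
    | rel h' => omega
  | rel h =>
    intro h2
    cases h2 with
    | cons _ => omega
    | rel h' => omega

theorem pairwise_pvCombos {xs : List Int} (hx : List.Pairwise (· < ·) xs) :
    ∀ (k : Nat), List.Pairwise (List.Lex (· < ·)) (pvCombos xs k) := by
  induction xs with
  | nil => intro k; cases k <;> simp [pvCombos]
  | cons x rest ih =>
    intro k
    cases k with
    | zero => simp [pvCombos]
    | succ k =>
      rw [pvCombos]
      apply List.pairwise_append.mpr
      refine ⟨?_, ih (List.pairwise_cons.mp hx).2 _, ?_⟩
      · rw [List.pairwise_map]
        exact (ih (List.pairwise_cons.mp hx).2 k).imp (fun h => List.Lex.cons h)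
      · intro c1 hc1 c2 hc2
        obtain ⟨c', _, rfl⟩ := List.mem_map.mp hc1
        obtain ⟨hs, hl⟩ := mem_pvCombos.mp hc2
        cases c2 with
        | nil => simp at hl
        | cons y t =>
          have hy : y ∈ rest := hs.subset (by simp)
          exact List.Lex.rel ((List.pairwise_cons.mp hx).1 y hy)

theorem pvSeqLoop_eq : ∀ (l : List Int) (count prev : Int),
    pvSeqLoop count prev l = count + seqPairs (prev :: l) := by
  intro l
  induction l with
  | nil => intro c p; simp [pvSeqLoop, seqPairs]
  | cons e t ih =>
    intro c p
    rw [pvSeqLoop, ih, seqPairs]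
    have : (e - 1 == p) = decide (e - 1 = p) := by
      rcases Bool.eq_false_or_eq_true (e - 1 == p) with h | h <;>
        simp_all
    rw [this]
    rcases Decidable.em (e - 1 = p) with h | h <;> simp [h] <;> ring

theorem seqPairs_le : ∀ (l : List Int) (x : Int), seqPairs (x :: l) ≤ (l.length : Int) := by
  intro l
  induction l with
  | nil => intro x; simp [seqPairs]
  | cons y t ih =>
    intro x
    rw [seqPairs]
    have := ih y
    simp only [List.length_cons]
    push_cast
    split <;> omega

theorem seqPairs_full : ∀ (l : List Int) (x : Int), List.Pairwise (· < ·) (x :: l) →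
    seqPairs (x :: l) = (l.length : Int) → x :: l = seqI x (l.length + 1) := by
  intro l
  induction l with
  | nil => intro x _ _; simp [seqI]
  | cons y t ih =>
    intro x hp hs
    rw [seqPairs] at hs
    have hb := seqPairs_le t y
    simp only [List.length_cons] at hs
    push_cast at hs
    have h1 : y - 1 = x := by
      by_contra h
      simp only [h, if_false] at hs
      omega
    simp only [h1, if_true] at hs
    have hs' : seqPairs (y :: t) = (t.length : Int) := by omega
    have hfull := ih y (List.pairwise_cons.mp hp).2 hs'
    rw [seqI] at hfull
    simp only [List.length_cons, seqI]
    rw [show x + 1 = y by omega, ← hfull]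

theorem seqPairs_onegap : ∀ (l : List Int) (x : Int), List.Pairwise (· < ·) (x :: l) →
    seqPairs (x :: l) = (l.length : Int) - 1 →
    ∃ (u v : Nat) (s : Int), 1 ≤ u ∧ 1 ≤ v ∧ u + v = l.length + 1 ∧ x + u < s ∧
      x :: l = seqI x u ++ seqI s v := by
  intro l
  induction l with
  | nil =>
    intro x _ hs
    simp [seqPairs] at hs
  | cons y t ih =>
    intro x hp hs
    rw [seqPairs] at hs
    simp only [List.length_cons] at hs
    push_cast at hs
    have hxy : x < y := (List.pairwise_cons.mp hp).1 y (by simp)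
    by_cases h : y - 1 = x
    · simp only [h, if_true] at hs
      have hs' : seqPairs (y :: t) = (t.length : Int) - 1 := by omega
      obtain ⟨u, v, s, hu, hv, huv, hgap, heq⟩ := ih y (List.pairwise_cons.mp hp).2 hs'
      refine ⟨u + 1, v, s, by omega, hv, by simp only [List.length_cons]; omega, ?_, ?_⟩
      · push_cast
        omega
      · rw [seqI, show x + 1 = y by omega, List.cons_append, ← heq]
    · simp only [h, if_false] at hs
      have hb := seqPairs_le t y
      have hs' : seqPairs (y :: t) = (t.length : Int) := by omega
      have hfull := seqPairs_full t y (List.pairwise_cons.mp hp).2 hs'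
      refine ⟨1, t.length + 1, y, le_refl _, by omega,
        by simp only [List.length_cons]; omega, by push_cast; omega, ?_⟩
      rw [seqI] at hfull
      simp only [seqI]
      rw [← hfull]
      simp

theorem seqPairs_seqI_append : ∀ (u : Nat) (a : Int) (c : List Int),
    seqPairs (seqI a (u + 1) ++ c) = (u : Int) + seqPairs ((a + u) :: c) := by
  intro u
  induction u with
  | zero => intro a c; simp [seqI]
  | succ u ih =>
    intro a c
    show seqPairs (a :: (seqI (a + 1) (u + 1) ++ c)) = _
    have hcons : seqI (a + 1) (u + 1) ++ c = (a + 1) :: (seqI (a + 2) u ++ c) := by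
      rw [seqI, List.cons_append]
      congr 2
      ring_nf
    rw [hcons, seqPairs, ← hcons, ih (a + 1) c]
    have : a + 1 - 1 = a := by ring
    rw [this, if_pos rfl]
    have harg : a + 1 + (u : Int) = a + ((u : Nat) + 1 : Nat) := by push_cast; ring
    rw [harg]
    push_cast
    ring

theorem seqPairs_seqI (a : Int) (u : Nat) : seqPairs (seqI a (u + 1)) = (u : Int) := by
  have := seqPairs_seqI_append u a []
  simpa [seqPairs] using this

-- characterization: the combinations A keeps for size i are exactly the blocks
theorem filter_mem_iff {n i : Nat} (h2 : 2 ≤ i) (hin : i < n) (c : List Int) :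
    (c ∈ pvCombos (seqI 0 n) i ∧ (((i : Int) - 2) == pvSeqCount c n) = true) ↔
      ∃ p, p < i - 1 ∧ c = blockf n i p := by
  constructor
  · rintro ⟨hc, hpred⟩
    obtain ⟨hs, hl⟩ := mem_pvCombos.mp hc
    rw [beq_iff_eq] at hpred
    cases c with
    | nil => simp at hl; omega
    | cons x rest =>
      rw [pvSeqCount] at hpred
      by_cases hx : x ≠ 0
      · rw [if_pos hx] at hpred; omega
      · rw [if_neg hx] at hpred
        push_neg at hx
        subst hx
        by_cases hlast : (0 :: rest).getLast? ≠ some ((n : Int) - 1)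
        · rw [if_pos hlast] at hpred; omega
        · rw [if_neg hlast] at hpred
          push_neg at hlast
          rw [pvSeqLoop_eq, zero_add] at hpred
          have hpw : List.Pairwise (· < ·) ((0 : Int) :: rest) :=
            List.Pairwise.sublist hs (pairwise_seqI 0 n)
          have hlen : rest.length = i - 1 := by simp at hl; omega
          have hsp : seqPairs ((0 : Int) :: rest) = (rest.length : Int) - 1 := by
            rw [hlen, ← hpred]
            have : ((i - 1 : Nat) : Int) = (i : Int) - 1 := by omega
            rw [this]; ring
          obtain ⟨u, v, s, hu, hv, huv, hgap, heq⟩ := seqPairs_onegap rest 0 hpw hsp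
          -- extract s from the last element
          obtain ⟨w, hw⟩ : ∃ w, v = w + 1 := ⟨v - 1, by omega⟩
          have hlast2 : ((0 : Int) :: rest).getLast? = some (s + v - 1) := by
            rw [heq, List.getLast?_append_of_ne_nil, seqI_getLast? s v (by omega)]
            subst hw; simp [seqI]
          rw [hlast] at hlast2
          have hsval : s = (n : Int) - v := by
            have := Option.some.inj hlast2
            omega
          refine ⟨u - 1, by omega, ?_⟩
          have harg : (n : Int) - (i : Int) + ((u - 1 : Nat) : Int) + 1 = s := by omega
          rw [blockf, show u - 1 + 1 = u by omega, show i - 1 - (u - 1) = v by omega,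
            harg, heq]
  · rintro ⟨p, hp, rfl⟩
    have hv : 1 ≤ i - 1 - p := by omega
    obtain ⟨w, hw⟩ : ∃ w, i - 1 - p = w + 1 := ⟨i - 1 - p - 1, by omega⟩
    constructor
    · apply mem_pvCombos.mpr
      constructor
      · rw [blockf]
        have hsplit : n = (p + 1) + (n - p - 1) := by omega
        conv_rhs => rw [hsplit, seqI_append]
        apply List.Sublist.append_left
        apply seqI_sublist
        · push_cast; omega
        · push_cast
          have : ((i - 1 - p : Nat) : Int) = (i : Int) - 1 - p := by omega
          rw [this]
          have : ((n - p - 1 : Nat) : Int) = (n : Int) - p - 1 := by omega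
          rw [this]
          omega
      · rw [blockf]
        simp [seqI_length]
        omega
    · rw [beq_iff_eq]
      have hshape : blockf n i p
          = (0 : Int) :: (seqI 1 p ++ seqI ((n : Int) - i + p + 1) (i - 1 - p)) := by
        rw [blockf, seqI, zero_add, List.cons_append]
      rw [hshape]
      simp only [pvSeqCount]
      rw [if_neg (by simp)]
      have hne : seqI ((n : Int) - i + p + 1) (i - 1 - p) ≠ [] := by
        rw [hw, seqI]; simp
      have hlastv : ((0 : Int) :: (seqI 1 p ++ seqI ((n : Int) - i + p + 1) (i - 1 - p))).getLast?
          = some ((n : Int) - 1) := by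
        rw [← List.cons_append, List.getLast?_append_of_ne_nil _ hne, seqI_getLast? _ _ hv]
        congr 1
        have : ((i - 1 - p : Nat) : Int) = (i : Int) - 1 - p := by omega
        rw [this]; ring
      rw [if_neg (by rw [hlastv]; simp)]
      rw [pvSeqLoop_eq, zero_add]
      have hshape' : (0 : Int) :: (seqI 1 p ++ seqI ((n : Int) - i + p + 1) (i - 1 - p))
          = seqI 0 (p + 1) ++ seqI ((n : Int) - i + p + 1) (i - 1 - p) := by
        rw [seqI, zero_add, List.cons_append]
      rw [hshape', seqPairs_seqI_append p 0, hw, seqI, seqPairs]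
      simp only [zero_add]
      rw [if_neg (by omega)]
      have hsp := seqPairs_seqI ((n : Int) - i + p + 1) w
      rw [seqI] at hsp
      rw [hsp]
      have : (w : Int) = (i : Int) - 2 - p := by omega
      omega

theorem block_lex {n i p p' : Nat} (h2 : 2 ≤ i) (hin : i < n) (hp : p ≤ i - 2) (hp' : p' < p) :
    List.Lex (· < ·) (blockf n i p) (blockf n i p') := by
  obtain ⟨d, hd⟩ : ∃ d, p - p' = d + 1 := ⟨p - p' - 1, by omega⟩
  obtain ⟨w, hw⟩ : ∃ w, i - 1 - p' = w + 1 := ⟨i - 1 - p' - 1, by omega⟩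
  have hsplit : p + 1 = (p' + 1) + (p - p') := by omega
  rw [blockf, blockf, hsplit, seqI_append, List.append_assoc, hd, hw, seqI, seqI]
  rw [show (0 : Int) + ((p' : Nat) + 1 : Nat) = (p' : Int) + 1 by push_cast; ring]
  exact lex_append_cons (by push_cast; omega)

theorem lex_ne {l₁ l₂ : List Int} (h : List.Lex (· < ·) l₁ l₂) : l₁ ≠ l₂ := by
  rintro rfl
  exact lex_asymm h h

theorem inner_eq {n i : Nat} (h2 : 2 ≤ i) (hin : i < n) :
    (pvCombos (seqI 0 n) i).filter (fun c => ((i : Int) - 2) == pvSeqCount c n)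
      = (List.range (i - 1)).reverse.map (fun p => blockf n i p) := by
  have hpwL : List.Pairwise (List.Lex (· < ·))
      ((pvCombos (seqI 0 n) i).filter (fun c => ((i : Int) - 2) == pvSeqCount c n)) :=
    (pairwise_pvCombos (pairwise_seqI 0 n) i).filter _
  have hpwR : List.Pairwise (List.Lex (· < ·))
      ((List.range (i - 1)).reverse.map (fun p => blockf n i p)) := by
    rw [List.pairwise_map, List.pairwise_reverse]
    rw [List.pairwise_iff_getElem]
    intro a b ha hb hab
    simp only [List.getElem_range]
    exact block_lex h2 hin (by simp at hb; omega) hab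
  have hmem : ∀ c, c ∈ (pvCombos (seqI 0 n) i).filter (fun c => ((i : Int) - 2) == pvSeqCount c n)
      ↔ c ∈ (List.range (i - 1)).reverse.map (fun p => blockf n i p) := by
    intro c
    rw [List.mem_filter, filter_mem_iff h2 hin]
    simp only [List.mem_map, List.mem_reverse, List.mem_range]
    constructor
    · rintro ⟨p, hp, rfl⟩; exact ⟨p, hp, rfl⟩
    · rintro ⟨p, hp, rfl⟩; exact ⟨p, hp, rfl⟩
  refine List.Perm.eq_of_pairwise (le := List.Lex (· < ·))
    (fun a b _ _ hab hba => absurd hba (fun h => lex_asymm hab h)) hpwL hpwR ?_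
  rw [List.perm_ext_iff_of_nodup
    (hpwL.imp (fun h => lex_ne h)) (hpwR.imp (fun h => lex_ne h))]
  exact hmem

theorem map_range_add (a : Int) (m : Nat) :
    (List.range m).map (fun (j : Nat) => a + (j : Int)) = seqI a m := by
  induction m with
  | zero => simp [seqI]
  | succ m ih =>
    rw [List.range_succ, List.map_append, ih, seqI_append a m 1]
    simp [seqI]

theorem map_range_cast (m : Nat) :
    (List.range m).map (fun (j : Nat) => (j : Int)) = seqI 0 m := by
  rw [← map_range_add 0 m]
  exact List.map_congr_left (fun a _ => by omega)

-- ===== VERDICT (by name: the statement is the Claim_ definition above) =====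
theorem get_all_possible_word_truncation_indices_spec : Claim_equal_get_all_possible_word_truncation_indices := by
  unfold Claim_equal_get_all_possible_word_truncation_indices
  intro words _
  unfold Spec_get_all_possible_word_truncation_indices
  unfold get_all_possible_word_truncation_indices get_all_possible_word_truncation_indices_alt
  simp only []
  rw [PySem.List.foldl_append_eq_flatMap, PySem.List.foldl_append_eq_flatMap,
    List.nil_append, List.nil_append]
  apply List.flatMap_congr
  intro i hi
  rw [List.mem_range'_1] at hi
  have h2 : 2 ≤ i := by omega
  have hin : i < words.length := by omega
  rw [map_range_cast, inner_eq h2 hin]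
  apply List.map_congr_left
  intro p hp
  rw [blockf, map_range_cast, map_range_add]
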